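-- pv_equiv track=rewrite | github.com/evostrov/tasks | different_real_expr_greedy_alg.py | calc_real_expr
-- ===== SOURCE A (Python) =====
-- def calc_real_expr(n):
--     i = n if n == 1 or n == 2 else 1
--     res = []
--     rest = n - i
--     while rest > i:
--         res.append(i)
--         i += 1
--         rest -= i
--
--     res.append(rest+i)
--
--     return res
-- ===== SOURCE B (Python) =====
-- def calc_real_expr(n):
--     # binary-search the greatest t >= 0 with t*(t+3)//2 < n, then emit the answer directly
--     lo, hi = 0, max(n, 0)
--     while lo < hi:
--         mid = (lo + hi + 1) // 2
--         if mid * (mid + 3) // 2 < n: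
--             lo = mid
--         else:
--             hi = mid - 1
--     t = lo
--     return list(range(1, t + 1)) + [n - t * (t + 1) // 2]
-- ===== Notes on version B (the rewrite author's own statement) =====
-- stated objective: alternative
-- what changed: Replaces A's rest-decrement while loop by a direct binary search for the greatest t with t*(t+3)//2 < n, then emits list(range(1,t+1)) + [n - t*(t+1)//2] in closed form.
import Mathlib
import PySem

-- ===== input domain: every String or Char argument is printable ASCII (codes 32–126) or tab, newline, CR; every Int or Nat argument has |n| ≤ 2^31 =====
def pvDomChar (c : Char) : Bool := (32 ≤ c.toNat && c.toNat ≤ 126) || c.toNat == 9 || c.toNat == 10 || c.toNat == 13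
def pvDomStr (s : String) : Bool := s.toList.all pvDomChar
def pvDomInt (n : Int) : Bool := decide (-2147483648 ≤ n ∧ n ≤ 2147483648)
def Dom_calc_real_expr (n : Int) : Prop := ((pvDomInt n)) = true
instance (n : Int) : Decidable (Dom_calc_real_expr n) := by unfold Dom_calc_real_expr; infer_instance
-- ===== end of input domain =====

-- B replaces A's rest-decrement while loop by a binary search for the break point t and emits
-- list(range(1,t+1)) ++ [n - t*(t+1)//2] directly (objective: alternative algorithm).

-- ===== PORT A =====
-- A's while loop. The Nat fuel is a totality guard only: the initial fuel rest.toNat is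
-- always enough (each iteration shrinks rest by more than it shrinks the fuel), and when
-- the fuel runs out the loop condition is already false, so the base branch is the loop exit.
def calcLoopA : Nat → Int → Int → List Int → List Int
  | 0, i, rest, res => res ++ [rest + i]
  | fuel + 1, i, rest, res =>
    if i < rest then calcLoopA fuel (i + 1) (rest - (i + 1)) (res ++ [i])
    else res ++ [rest + i]

def calc_real_expr (n : Int) : List Int :=
  let i : Int := if n = 1 ∨ n = 2 then n else 1
  calcLoopA (n - i).toNat i (n - i) []

-- ===== PORT B =====
-- Source B's binary-search loop: greatest t in [lo, hi] with t*(t+3)//2 < n. The Nat fuel is a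
-- totality guard only: (hi - lo).toNat suffices since the interval shrinks each step, and
-- exhausted fuel means lo = hi already, which is the loop exit.
def calcBS : Nat → Int → Int → Int → Int
  | 0, _, lo, _ => lo
  | fuel + 1, n, lo, hi =>
    if lo < hi then
      let mid := PySem.Int.floordiv (lo + hi + 1) 2
      if PySem.Int.floordiv (mid * (mid + 3)) 2 < n then calcBS fuel n mid hi
      else calcBS fuel n lo (mid - 1)
    else lo

def calc_real_expr_alt (n : Int) : List Int :=
  let t : Int := calcBS (max n 0 - 0).toNat n 0 (max n 0)
  PySem.List.pyRange 1 (t + 1) 1 ++ [n - PySem.Int.floordiv (t * (t + 1)) 2]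

-- ===== PRECONDITION & SPEC =====
def Spec_calc_real_expr (n : Int) (out : List Int) : Prop := out = calc_real_expr_alt n
instance (n : Int) (out : List Int) : Decidable (Spec_calc_real_expr n out) := by unfold Spec_calc_real_expr; infer_instance

-- ===== CLAIM (what is proved, stated in full; the proofs are below) =====
def Claim_equal_calc_real_expr : Prop := ∀ (n : Int), Dom_calc_real_expr n → Spec_calc_real_expr n (calc_real_expr n)

-- ===== LEMMAS AND PROOFS =====

-- The binary search returns some t with 0 ≤ t, (t = 0 or 2n > t(t+3)), and 2n ≤ (t+1)(t+4).
theorem calcBS_spec (n : Int) : ∀ (fuel : Nat) (lo hi : Int), (hi - lo).toNat ≤ fuel →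
    0 ≤ lo → lo ≤ hi → (lo = 0 ∨ 2 * n > lo * (lo + 3)) → 2 * n ≤ (hi + 1) * (hi + 4) →
    0 ≤ calcBS fuel n lo hi ∧
      (calcBS fuel n lo hi = 0 ∨ 2 * n > calcBS fuel n lo hi * (calcBS fuel n lo hi + 3)) ∧
      2 * n ≤ (calcBS fuel n lo hi + 1) * (calcBS fuel n lo hi + 4) := by
  intro fuel
  induction fuel with
  | zero =>
    intro lo hi hf h0 hle hlo hhi
    have : lo = hi := by omega
    subst this
    exact ⟨h0, hlo, hhi⟩
  | succ f ih =>
    intro lo hi hf h0 hle hlo hhi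
    rw [calcBS]
    by_cases hlt : lo < hi
    · have hmid := PySem.Int.floordiv_eq_ediv_of_pos (a := lo + hi + 1) (by omega : (0:Int) < 2)
      rw [if_pos hlt]
      set mid := PySem.Int.floordiv (lo + hi + 1) 2 with hm
      have h1 : lo < mid := by omega
      have h2 : mid ≤ hi := by omega
      by_cases hc : PySem.Int.floordiv (mid * (mid + 3)) 2 < n
      · have hc' : mid * (mid + 3) < 2 * n := by
          rw [PySem.Int.floordiv_lt_iff_lt_mul (by omega : (0:Int) < 2)] at hc; omega
        rw [if_pos hc]
        exact ih mid hi (by omega) (by omega) h2 (Or.inr (by omega)) hhi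
      · have hc' : 2 * n ≤ mid * (mid + 3) := by
          rw [not_lt, PySem.Int.le_floordiv_iff_mul_le (by omega : (0:Int) < 2)] at hc; omega
        rw [if_neg hc]
        have hr : (mid - 1 + 1) * (mid - 1 + 4) = mid * (mid + 3) := by ring
        exact ih lo (mid - 1) (by omega) h0 (by omega) hlo (by omega)
    · rw [if_neg hlt]
      have : lo = hi := by omega
      subst this
      exact ⟨h0, hlo, hhi⟩

-- A's loop, entered at i with 2*rest = 2*n - i*(i+1) and enough fuel, stops at t+1 and
-- produces range(i, t+1) followed by the closed-form last element.
theorem loop_eq (n t : Int) (ht : 0 ≤ t) (hub : 2 * n ≤ (t + 1) * (t + 4))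
    (hlb : t = 0 ∨ 2 * n > t * (t + 3)) :
    ∀ (fuel : Nat) (i rest : Int) (res : List Int),
      1 ≤ i → i ≤ t + 1 → 2 * rest = 2 * n - i * (i + 1) → rest.toNat ≤ fuel →
      calcLoopA fuel i rest res =
        res ++ PySem.List.pyRange i (t + 1) 1 ++ [n - PySem.Int.floordiv (t * (t + 1)) 2] := by
  have hdiv : PySem.Int.floordiv (t * (t + 1)) 2 * 2 = t * (t + 1) := by
    obtain ⟨c, hc⟩ := Int.even_mul_succ_self t
    rw [PySem.Int.floordiv_eq_ediv_of_pos (by omega : (0:Int) < 2)]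
    omega
  -- shared exit computation: at i = t+1 the returned element is the closed form
  have exit : ∀ (rest : Int) (res : List Int), 2 * rest = 2 * n - (t + 1) * (t + 1 + 1) →
      res ++ [rest + (t + 1)] =
        res ++ PySem.List.pyRange (t + 1) (t + 1) 1 ++ [n - PySem.Int.floordiv (t * (t + 1)) 2] := by
    intro rest res hrest
    have hr2 : (t + 1) * (t + 1 + 1) = t * (t + 1) + 2 * (t + 1) := by ring
    have hrange : PySem.List.pyRange (t + 1) (t + 1) 1 = [] := by
      rw [PySem.List.pyRange_one]; simp
    have hval : rest + (t + 1) = n - PySem.Int.floordiv (t * (t + 1)) 2 := by omega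
    rw [hrange, hval]; simp
  -- at any i ≤ t the loop condition holds strictly
  have hcont : ∀ i : Int, 1 ≤ i → i ≤ t → 2 * n > i * (i + 3) := by
    intro i h1 h2
    have hlb' : 2 * n > t * (t + 3) := hlb.resolve_left (by omega)
    have hmono : t * (t + 3) - i * (i + 3) = (t - i) * (t + i + 3) := by ring
    have hmono' : 0 ≤ (t - i) * (t + i + 3) := mul_nonneg (by omega) (by omega)
    omega
  intro fuel
  induction fuel with
  | zero =>
    intro i rest res h1 h2 hrest hf
    have hi : i = t + 1 := by
      by_contra hne
      have hgt := hcont i h1 (by omega)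
      have : i * (i + 3) = i * (i + 1) + 2 * i := by ring
      omega
    subst hi
    rw [calcLoopA]
    exact exit rest res hrest
  | succ f ih =>
    intro i rest res h1 h2 hrest hf
    rw [calcLoopA]
    by_cases hi : i = t + 1
    · subst hi
      have hr1 : (t + 1) * (t + 4) = (t + 1) * (t + 1 + 1) + 2 * (t + 1) := by ring
      rw [if_neg (by omega : ¬ (t + 1 < rest))]
      exact exit rest res hrest
    · have hit : i ≤ t := by omega
      have hgt := hcont i h1 hit
      have hsq : i * (i + 3) = i * (i + 1) + 2 * i := by ring
      rw [if_pos (by omega : i < rest)]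
      have hstep : 2 * (rest - (i + 1)) = 2 * n - (i + 1) * (i + 1 + 1) := by
        have : (i + 1) * (i + 1 + 1) = i * (i + 1) + 2 * (i + 1) := by ring
        omega
      rw [ih (i + 1) (rest - (i + 1)) (res ++ [i]) (by omega) (by omega) hstep (by omega),
        PySem.List.pyRange_one_cons (by omega : i < t + 1)]
      simp

-- B's output written in terms of the t returned by the binary search.
theorem alt_eq (n : Int) :
    calc_real_expr_alt n =
      PySem.List.pyRange 1 (calcBS (max n 0 - 0).toNat n 0 (max n 0) + 1) 1 ++
        [n - PySem.Int.floordiv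
          (calcBS (max n 0 - 0).toNat n 0 (max n 0) *
            (calcBS (max n 0 - 0).toNat n 0 (max n 0) + 1)) 2] := rfl

-- ===== VERDICT (by name: the statement is the Claim_ definition above) =====
theorem calc_real_expr_spec : Claim_equal_calc_real_expr := by
  intro n _
  unfold Spec_calc_real_expr
  have hinit : 2 * n ≤ (max n 0 + 1) * (max n 0 + 4) := by
    by_cases h : n ≤ 0
    · rw [max_eq_right h]; omega
    · rw [max_eq_left (by omega : (0:Int) ≤ n)]; nlinarith
  obtain ⟨ht0, hlb, hub⟩ := calcBS_spec n (max n 0 - 0).toNat 0 (max n 0) le_rfl le_rfl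
    (le_max_right n 0) (Or.inl rfl) hinit
  rw [alt_eq n]
  set t := calcBS (max n 0 - 0).toNat n 0 (max n 0) with htdef
  by_cases hn : n = 1 ∨ n = 2
  · have hi : calc_real_expr n = calcLoopA (n - n).toNat n (n - n) [] := by
      unfold calc_real_expr; rw [if_pos hn]
    rcases hn with h1 | h2
    · subst h1
      have ht : t = 0 := by
        rcases hlb with h | h
        · exact h
        · by_contra hne
          have : 1 ≤ t := by omega
          nlinarith
      rw [hi, ht]
      exact loop_eq 1 0 le_rfl (by omega) (Or.inl rfl) ((1 - 1 : Int)).toNat 1 (1 - 1) []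
        le_rfl (by omega) (by omega) (by omega)
    · subst h2
      have ht : t = 0 := by
        rcases hlb with h | h
        · exact h
        · by_contra hne
          have : 1 ≤ t := by omega
          nlinarith
      rw [hi, ht]
      have h0 : ((2:Int) - 2).toNat = 0 := by omega
      rw [h0, calcLoopA]
      have hrange : PySem.List.pyRange (1:Int) (0 + 1) 1 = [] := by
        rw [PySem.List.pyRange_one]; simp
      have hdiv : PySem.Int.floordiv ((0:Int) * (0 + 1)) 2 = 0 := by
        norm_num [PySem.Int.floordiv_eq_ediv_of_pos (by omega : (0:Int) < 2)]
      rw [hrange, hdiv]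
      norm_num
  · have hi : calc_real_expr n = calcLoopA (n - 1).toNat 1 (n - 1) [] := by
      unfold calc_real_expr; rw [if_neg hn]
    rw [hi]
    exact loop_eq n t ht0 hub hlb ((n - 1 : Int)).toNat 1 (n - 1) [] le_rfl (by omega)
      (by omega) (by omega)
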